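-- pv_equiv track=rewrite | github.com/p1ngu-ps1/fortihoney | fortihoney-flask/app.py | is_suspicious_request
-- ===== SOURCE A (Python) =====
-- def is_suspicious_request(path: str, query_string: str, user_agent: str, headers: dict) -> bool:
--     """Detect suspicious scanning/attack patterns."""
--     suspicious_patterns = [
--         # Path traversal
--         '../', '..\\', '/etc/', '/proc/', '/var/', '/dev/cmdb/',
--         # Common exploits
--         '.env', '.git', '.aws', 'wp-admin', 'phpmyadmin',
--         'shell', 'cmd', 'exec', 'eval', 'base64',
--         # SQL injection
--         "' OR ", '" OR ', 'UNION SELECT', 'DROP TABLE',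
--         # XSS
--         '<script', 'javascript:', 'onerror=',
--         # Path traversal (encoded)
--         '%2e%2e', '....',
--         # ROP/shellcode indicators
--         '\\x90', '%u', 'shellcode', 'payload',
--         # Common scanning
--         '/api/', '/admin/', '/config/', '/backup/',
--     ]
--
--     check_string = (path + query_string + user_agent).lower()
--
--     # Check forwarded headers for CVE-2022-40684
--     if '127.0.0.1' in headers.get('Forwarded', '').lower():
--         return True
--
--     return any(pattern.lower() in check_string for pattern in suspicious_patterns)
-- ===== SOURCE B (Python) =====
-- # B: one left-to-right pass over the lowered string; a first-character index
-- # (built once from the pre-lowered patterns) means each position only tests the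
-- # patterns that could start there, instead of one full substring scan per pattern.
-- _PATTERNS = [p.lower() for p in [
--     '../', '..\\', '/etc/', '/proc/', '/var/', '/dev/cmdb/',
--     '.env', '.git', '.aws', 'wp-admin', 'phpmyadmin',
--     'shell', 'cmd', 'exec', 'eval', 'base64',
--     "' OR ", '" OR ', 'UNION SELECT', 'DROP TABLE',
--     '<script', 'javascript:', 'onerror=',
--     '%2e%2e', '....',
--     '\\x90', '%u', 'shellcode', 'payload',
--     '/api/', '/admin/', '/config/', '/backup/',
-- ]]
--
-- _BY_FIRST = {}
-- for _p in _PATTERNS: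
--     _BY_FIRST.setdefault(_p[0], []).append(_p)
--
-- def is_suspicious_request(path: str, query_string: str, user_agent: str, headers: dict) -> bool:
--     if '127.0.0.1' in headers.get('Forwarded', '').lower():
--         return True
--     s = (path + query_string + user_agent).lower()
--     for i, ch in enumerate(s):
--         for p in _BY_FIRST.get(ch, ()):
--             if s.startswith(p, i):
--                 return True
--     return False
-- ===== Notes on version B (the rewrite author's own statement) =====
-- stated objective: alternative
-- what changed: Instead of one full substring scan per pattern (with each pattern re-lowercased on every call), B pre-lowers the patterns once, builds a first-character index over them, and makes a single left-to-right pass over the lowered string, testing at each position only the patterns whose first character matches.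
import Mathlib
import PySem

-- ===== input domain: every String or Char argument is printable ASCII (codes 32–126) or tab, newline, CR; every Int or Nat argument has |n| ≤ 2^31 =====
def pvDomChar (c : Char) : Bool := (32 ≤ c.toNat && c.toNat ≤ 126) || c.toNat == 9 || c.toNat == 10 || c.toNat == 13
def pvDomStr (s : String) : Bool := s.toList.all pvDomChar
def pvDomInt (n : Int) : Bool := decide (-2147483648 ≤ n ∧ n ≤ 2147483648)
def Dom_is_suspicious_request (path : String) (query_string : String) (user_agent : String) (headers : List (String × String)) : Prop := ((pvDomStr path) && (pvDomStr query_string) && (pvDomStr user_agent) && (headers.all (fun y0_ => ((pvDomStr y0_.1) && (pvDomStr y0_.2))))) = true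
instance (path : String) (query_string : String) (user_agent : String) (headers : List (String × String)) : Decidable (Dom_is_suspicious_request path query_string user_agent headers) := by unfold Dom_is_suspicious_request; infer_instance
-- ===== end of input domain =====

-- B replaces A's one-full-substring-scan-per-pattern (patterns re-lowered on every call)
-- by a pre-lowered pattern list indexed by first character and one left-to-right pass
-- that tests only the patterns that could start at each position.

-- ===== PORT A =====
def suspiciousPatternsA : List String := [
  "../", "..\\", "/etc/", "/proc/", "/var/", "/dev/cmdb/",
  ".env", ".git", ".aws", "wp-admin", "phpmyadmin",
  "shell", "cmd", "exec", "eval", "base64",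
  "' OR ", "\" OR ", "UNION SELECT", "DROP TABLE",
  "<script", "javascript:", "onerror=",
  "%2e%2e", "....",
  "\\x90", "%u", "shellcode", "payload",
  "/api/", "/admin/", "/config/", "/backup/"]

def is_suspicious_request (path : String) (query_string : String) (user_agent : String) (headers : List (String × String)) : Bool :=
  let check_string := PySem.Str.lower (path ++ query_string ++ user_agent)
  if PySem.Str.isIn "127.0.0.1" (PySem.Str.lower ((PySem.Dict.mk headers).getD "Forwarded" "")) then
    true
  else
    suspiciousPatternsA.any (fun pattern => PySem.Str.isIn (PySem.Str.lower pattern) check_string)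

-- ===== PORT B =====
-- Source B's module-level `_PATTERNS = [p.lower() for p in [...]]`
def patternsB : List String := (([
  "../", "..\\", "/etc/", "/proc/", "/var/", "/dev/cmdb/",
  ".env", ".git", ".aws", "wp-admin", "phpmyadmin",
  "shell", "cmd", "exec", "eval", "base64",
  "' OR ", "\" OR ", "UNION SELECT", "DROP TABLE",
  "<script", "javascript:", "onerror=",
  "%2e%2e", "....",
  "\\x90", "%u", "shellcode", "payload",
  "/api/", "/admin/", "/config/", "/backup/"] : List String).map PySem.Str.lower)

-- Source B's `for _p in _PATTERNS: _BY_FIRST.setdefault(_p[0], []).append(_p)`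
-- (setdefault+append in place = overwrite the key's list with old ++ [p]; every
-- pattern is a nonempty literal, so the [] guard branch is never taken)
def byFirstB : PySem.Dict Char (List String) :=
  patternsB.foldl (fun d p =>
    match p.toList with
    | c :: _ => d.insert c (d.getD c [] ++ [p])
    | [] => d) PySem.Dict.empty

-- Source B's `for i, ch in enumerate(s): for p in _BY_FIRST.get(ch, ()): if s.startswith(p, i)`:
-- walk the suffixes of s, testing at each position only the patterns indexed by its first char.
def scanB (d : PySem.Dict Char (List String)) : List Char → Bool
  | [] => false
  | c :: t => (d.getD c []).any (fun p => PySem.Chars.startswith (c :: t) p.toList) || scanB d t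

def is_suspicious_request_alt (path : String) (query_string : String) (user_agent : String) (headers : List (String × String)) : Bool :=
  if PySem.Str.isIn "127.0.0.1" (PySem.Str.lower ((PySem.Dict.mk headers).getD "Forwarded" "")) then
    true
  else
    scanB byFirstB (PySem.Str.lower (path ++ query_string ++ user_agent)).toList

-- ===== PRECONDITION & SPEC =====
def Spec_is_suspicious_request (path : String) (query_string : String) (user_agent : String) (headers : List (String × String)) (out : Bool) : Prop := out = is_suspicious_request_alt path query_string user_agent headers
instance (path : String) (query_string : String) (user_agent : String) (headers : List (String × String)) (out : Bool) : Decidable (Spec_is_suspicious_request path query_string user_agent headers out) := by unfold Spec_is_suspicious_request; infer_instance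

-- ===== CLAIM (what is proved, stated in full; the proofs are below) =====
def Claim_equal_is_suspicious_request : Prop := ∀ (path : String) (query_string : String) (user_agent : String) (headers : List (String × String)), Dom_is_suspicious_request path query_string user_agent headers → Spec_is_suspicious_request path query_string user_agent headers (is_suspicious_request path query_string user_agent headers)

-- ===== LEMMAS AND PROOFS =====

-- the value byFirstB evaluates to, written out
def byFirstItems : List (Char × List String) := [
  ('.', ["../", "..\\", ".env", ".git", ".aws", "...."]),
  ('/', ["/etc/", "/proc/", "/var/", "/dev/cmdb/", "/api/", "/admin/", "/config/", "/backup/"]),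
  ('w', ["wp-admin"]), ('p', ["phpmyadmin", "payload"]), ('s', ["shell", "shellcode"]),
  ('c', ["cmd"]), ('e', ["exec", "eval"]), ('b', ["base64"]),
  ('\'', ["' or "]), ('"', ["\" or "]), ('u', ["union select"]), ('d', ["drop table"]),
  ('<', ["<script"]), ('j', ["javascript:"]), ('o', ["onerror="]),
  ('%', ["%2e%2e", "%u"]), ('\\', ["\\x90"])]

set_option maxRecDepth 10000 in
theorem byFirstB_eq : byFirstB = PySem.Dict.mk byFirstItems := by decide

theorem byFirstItems_sound :
    ∀ pr ∈ byFirstItems, ∀ p ∈ pr.2, p ∈ patternsB ∧ p.toList.head? = some pr.1 := by decide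

theorem byFirstItems_complete :
    ∀ p ∈ patternsB, ∃ pr ∈ byFirstItems, p.toList.head? = some pr.1 ∧ p ∈ pr.2 := by decide

theorem patternsB_ne_nil : ∀ p ∈ patternsB, p.toList ≠ [] := by decide

theorem byFirstItems_nodup : (byFirstItems.map Prod.fst).Nodup := by decide

theorem patternsB_lower : ∀ p ∈ suspiciousPatternsA, PySem.Str.lower p ∈ patternsB := by decide

theorem patternsB_of_lower : ∀ q ∈ patternsB, ∃ p ∈ suspiciousPatternsA, PySem.Str.lower p = q := by
  decide

theorem getD_mk_cons (k : Char) (v : List String) (rest : List (Char × List String)) (c : Char) :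
    (PySem.Dict.mk ((k, v) :: rest)).getD c [] =
      if k == c then v else (PySem.Dict.mk rest).getD c [] := by
  rw [PySem.Dict.getD_eq_get?_getD, PySem.Dict.get?_mk_cons, PySem.Dict.getD_eq_get?_getD]
  split <;> rfl

theorem mem_getD_mk (L : List (Char × List String)) (c : Char) (p : String)
    (hnd : (L.map Prod.fst).Nodup) :
    p ∈ (PySem.Dict.mk L).getD c [] ↔ ∃ pr ∈ L, pr.1 = c ∧ p ∈ pr.2 := by
  induction L with
  | nil =>
    have hnil : (PySem.Dict.mk ([] : List (Char × List String))).getD c [] = ([] : List String) := rfl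
    rw [hnil]
    constructor
    · intro h; exact absurd h List.not_mem_nil
    · rintro ⟨pr, hpr, _⟩; exact absurd hpr List.not_mem_nil
  | cons hd tl ih =>
    obtain ⟨k, v⟩ := hd
    simp only [List.map_cons, List.nodup_cons] at hnd
    rw [getD_mk_cons]
    by_cases hk : k = c
    · subst hk
      simp only [beq_self_eq_true, if_true]
      constructor
      · intro hp; exact ⟨(k, v), List.mem_cons_self, rfl, hp⟩
      · rintro ⟨pr, hpr, hc, hp⟩
        rcases List.mem_cons.1 hpr with rfl | htl
        · exact hp
        · exact absurd (hc ▸ List.mem_map_of_mem (f := Prod.fst) htl) hnd.1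
    · simp only [beq_iff_eq, hk, if_false]
      rw [ih hnd.2]
      constructor
      · rintro ⟨pr, hpr, hc, hp⟩; exact ⟨pr, List.mem_cons_of_mem _ hpr, hc, hp⟩
      · rintro ⟨pr, hpr, hc, hp⟩
        rcases List.mem_cons.1 hpr with rfl | htl
        · exact absurd hc hk
        · exact ⟨pr, htl, hc, hp⟩

theorem mem_byFirstB (c : Char) (p : String) :
    p ∈ byFirstB.getD c [] ↔ p ∈ patternsB ∧ p.toList.head? = some c := by
  rw [byFirstB_eq, mem_getD_mk _ _ _ byFirstItems_nodup]
  constructor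
  · rintro ⟨pr, hpr, rfl, hp⟩
    exact byFirstItems_sound pr hpr p hp
  · rintro ⟨hp, hhd⟩
    obtain ⟨pr, hpr, hh, hmem⟩ := byFirstItems_complete p hp
    rw [hhd] at hh
    exact ⟨pr, hpr, (Option.some.inj hh).symm, hmem⟩

-- the positional indexed scan finds a pattern iff some pattern is an infix of the string
theorem scanB_eq_true_iff (cs : List Char) :
    scanB byFirstB cs = true ↔ ∃ p ∈ patternsB, p.toList <:+: cs := by
  induction cs with
  | nil =>
    constructor
    · intro h; exact absurd h (by simp [scanB])
    · rintro ⟨p, hp, hinf⟩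
      exact (patternsB_ne_nil p hp (List.eq_nil_of_infix_nil hinf)).elim
  | cons c t ih =>
    simp only [scanB, Bool.or_eq_true, ih, List.any_eq_true, PySem.Chars.startswith_iff,
      List.infix_cons_iff]
    constructor
    · rintro (⟨p, hp, h⟩ | ⟨p, hp, h⟩)
      · exact ⟨p, ((mem_byFirstB c p).1 hp).1, Or.inl h⟩
      · exact ⟨p, hp, Or.inr h⟩
    · rintro ⟨p, hp, h | h⟩
      · refine Or.inl ⟨p, (mem_byFirstB c p).2 ⟨hp, ?_⟩, h⟩
        rcases hpl : p.toList with _ | ⟨c', r⟩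
        · exact absurd hpl (patternsB_ne_nil p hp)
        · rw [hpl] at h
          obtain ⟨rfl, -⟩ := List.cons_prefix_cons.1 h
          rfl
      · exact Or.inr ⟨p, hp, h⟩

theorem anyIsIn_eq_scanB (s : String) :
    suspiciousPatternsA.any (fun p => PySem.Str.isIn (PySem.Str.lower p) s)
      = scanB byFirstB s.toList := by
  rcases h : scanB byFirstB s.toList with _ | _
  · rw [List.any_eq_false]
    intro p hp
    rw [Bool.not_eq_true, ← Bool.not_eq_true, PySem.Str.isIn_iff_infix]
    intro hinf
    rw [← Bool.not_eq_true, scanB_eq_true_iff] at h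
    exact h ⟨PySem.Str.lower p, patternsB_lower p hp, hinf⟩
  · rw [scanB_eq_true_iff] at h
    obtain ⟨q, hq, hinf⟩ := h
    obtain ⟨p, hp, rfl⟩ := patternsB_of_lower q hq
    rw [List.any_eq_true]
    exact ⟨p, hp, (PySem.Str.isIn_iff_infix _ _).2 hinf⟩

-- ===== VERDICT (by name: the statement is the Claim_ definition above) =====
theorem is_suspicious_request_spec : Claim_equal_is_suspicious_request := by
  intro path query_string user_agent headers _
  unfold Spec_is_suspicious_request is_suspicious_request is_suspicious_request_alt
  split
  · rfl
  · exact anyIsIn_eq_scanB _
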